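-- pv_equiv track=rewrite | github.com/autyauth/mutuAI_fund_investment_advisor | mafia_backend/app/services/tax_2025_service.py | _calculate_child_deduction
-- ===== SOURCE A (Python) =====
-- from typing import Dict, List
--
-- def _calculate_child_deduction(children: List[Dict]) -> float:
--     total_deduction = 0
--     adopted_count = 0
--
--     for i, child in enumerate(children):
--         if child.get('is_adopted'):
--             if adopted_count < 3:
--                 total_deduction += 30000
--                 adopted_count += 1
--             continue
--
--         if i == 0:  # First child
--             total_deduction += 30000
--         else:  # Second and subsequent children
--             if child.get('birth_after_2018'):
--                 total_deduction += 60000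
--             else:
--                 total_deduction += 30000
--
--     return total_deduction
-- ===== SOURCE B (Python) =====
-- from typing import Dict, List
--
-- def _calculate_child_deduction(children: List[Dict]) -> float:
--     # Arithmetic/counting formulation: every child is worth a base 30000;
--     # a non-adopted child after position 0 born after 2018 is worth one extra 30000;
--     # each adopted child beyond the third loses its 30000.
--     n = len(children)
--     adopted = sum(1 for c in children if c.get('is_adopted'))
--     bonus = sum(1 for i, c in enumerate(children)
--                 if i > 0 and not c.get('is_adopted') and c.get('birth_after_2018'))
--     return 30000 * (n + bonus - max(adopted - 3, 0))
-- ===== Notes on version B (the rewrite author's own statement) =====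
-- stated objective: alternative
-- what changed: Replaces A's stateful per-child rate-accumulation loop with a pure counting formula: the result is 30000 times (number of children + number of post-first non-adopted children born after 2018 - number of adopted children beyond the cap of 3).
import Mathlib
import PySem

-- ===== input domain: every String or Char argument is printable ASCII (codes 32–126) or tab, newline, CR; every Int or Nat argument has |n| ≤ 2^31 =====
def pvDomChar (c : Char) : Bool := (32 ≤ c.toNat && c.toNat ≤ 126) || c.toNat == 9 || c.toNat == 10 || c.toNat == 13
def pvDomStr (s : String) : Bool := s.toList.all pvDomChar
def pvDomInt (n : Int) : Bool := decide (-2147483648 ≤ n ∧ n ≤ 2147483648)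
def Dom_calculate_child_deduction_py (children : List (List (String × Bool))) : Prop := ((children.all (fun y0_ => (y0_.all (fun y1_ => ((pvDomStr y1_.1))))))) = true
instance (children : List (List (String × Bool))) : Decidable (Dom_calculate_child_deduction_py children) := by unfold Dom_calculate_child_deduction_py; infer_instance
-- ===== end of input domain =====

-- B replaces A's stateful rate-accumulation loop by a pure counting formula:
-- 30000 * (n + #(post-first non-adopted born-after-2018) - #(adopted beyond 3)) (objective: alternative).

-- child.get(k) truthiness: first-match association-list lookup, missing key counts as false (exact for dicts)
def pvGetB (d : List (String × Bool)) (k : String) : Bool := (d.lookup k).getD false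

-- ===== PORT A =====
-- A's loop, step for step: i = index, cnt = adopted_count, tot = total_deduction
def pvLoopA (i cnt tot : Int) : List (List (String × Bool)) → Int
  | [] => tot
  | c :: rest =>
    if pvGetB c "is_adopted" then
      if cnt < 3 then pvLoopA (i + 1) (cnt + 1) (tot + 30000) rest
      else pvLoopA (i + 1) cnt tot rest
    else if i == 0 then pvLoopA (i + 1) cnt (tot + 30000) rest
    else if pvGetB c "birth_after_2018" then pvLoopA (i + 1) cnt (tot + 60000) rest
    else pvLoopA (i + 1) cnt (tot + 30000) rest

def calculate_child_deduction_py (children : List (List (String × Bool))) : Int :=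
  pvLoopA 0 0 0 children

-- ===== PORT B =====
def calculate_child_deduction_py_alt (children : List (List (String × Bool))) : Int :=
  let n : Int := (children.length : Int)
  let adopted : Int := ((children.filter (fun c => pvGetB c "is_adopted")).length : Int)
  let bonus : Int := (((PySem.List.enumerate children 0).filter
      (fun p => decide (0 < p.1) && !pvGetB p.2 "is_adopted" && pvGetB p.2 "birth_after_2018")).length : Int)
  30000 * (n + bonus - max (adopted - 3) 0)

-- ===== PRECONDITION & SPEC =====
def Spec_calculate_child_deduction_py (children : List (List (String × Bool))) (out : Int) : Prop := out = calculate_child_deduction_py_alt children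
instance (children : List (List (String × Bool))) (out : Int) : Decidable (Spec_calculate_child_deduction_py children out) := by unfold Spec_calculate_child_deduction_py; infer_instance

-- ===== CLAIM (what is proved, stated in full; the proofs are below) =====
def Claim_equal_calculate_child_deduction_py : Prop := ∀ (children : List (List (String × Bool))), Dom_calculate_child_deduction_py children → Spec_calculate_child_deduction_py children (calculate_child_deduction_py children)

-- ===== LEMMAS AND PROOFS =====

-- value contributed by the non-adopted children starting at index i (A's non-adopted branches)
def pvNspec (i : Int) : List (List (String × Bool)) → Int
  | [] => 0
  | c :: rest =>
    (if pvGetB c "is_adopted" then 0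
     else if i == 0 then (30000 : Int)
     else if pvGetB c "birth_after_2018" then 60000 else 30000) + pvNspec (i + 1) rest

theorem pvLoopA_eq (l : List (List (String × Bool))) : ∀ (i cnt tot : Int), 0 ≤ cnt →
    pvLoopA i cnt tot l
    = tot + min (((l.filter (fun c => pvGetB c "is_adopted")).length : Int)) (max (3 - cnt) 0) * 30000
        + pvNspec i l := by
  induction l with
  | nil => intro i cnt tot _; simp [pvLoopA, pvNspec]
  | cons c rest ih =>
    intro i cnt tot hcnt
    simp only [pvLoopA, pvNspec, List.filter_cons]
    by_cases hA : pvGetB c "is_adopted"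
    · rw [if_pos hA, if_pos hA, if_pos hA]
      by_cases hlt : cnt < 3
      · rw [if_pos hlt, ih _ _ _ (by omega)]
        simp only [List.length_cons]
        push_cast
        omega
      · rw [if_neg hlt, ih _ _ _ hcnt]
        simp only [List.length_cons]
        push_cast
        omega
    · rw [if_neg hA, if_neg hA, if_neg hA]
      by_cases hi : (i == 0) = true
      · rw [if_pos hi, if_pos hi, ih _ _ _ hcnt]; ring
      · rw [if_neg hi, if_neg hi]
        by_cases hb : pvGetB c "birth_after_2018"
        · rw [if_pos hb, if_pos hb, ih _ _ _ hcnt]; ring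
        · rw [if_neg hb, if_neg hb, ih _ _ _ hcnt]; ring

-- the non-adopted contribution as pure counts: 30000 per non-adopted child plus 30000 per bonus child
theorem pvNspec_count (l : List (List (String × Bool))) : ∀ (s : Int), 0 ≤ s →
    pvNspec s l
    = 30000 * (((l.filter (fun c => !pvGetB c "is_adopted")).length : Int))
      + 30000 * ((((PySem.List.enumerate l s).filter
          (fun p => decide (0 < p.1) && !pvGetB p.2 "is_adopted" && pvGetB p.2 "birth_after_2018")).length : Int)) := by
  induction l with
  | nil => intro s _; simp [pvNspec, PySem.List.enumerate_nil]
  | cons c rest ih =>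
    intro s hs
    rw [PySem.List.enumerate_cons]
    simp only [pvNspec, List.filter_cons, ih (s + 1) (by omega)]
    by_cases hA : pvGetB c "is_adopted"
    · simp [hA]
    · by_cases hz : s = 0
      · simp [hA, hz]
        ring
      · have hpos : 0 < s := by omega
        have hbeq : (s == 0) = false := by simpa using hz
        by_cases hb : pvGetB c "birth_after_2018"
        · simp [hA, hb, hbeq, hpos]
          ring
        · simp [hA, hb, hbeq, hpos]
          ring

-- ===== VERDICT (by name: the statement is the Claim_ definition above) =====
theorem calculate_child_deduction_py_spec : Claim_equal_calculate_child_deduction_py := by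
  intro children _
  unfold Spec_calculate_child_deduction_py calculate_child_deduction_py calculate_child_deduction_py_alt
  simp only []
  rw [pvLoopA_eq children 0 0 0 le_rfl, pvNspec_count children 0 le_rfl]
  have hsplit : children.length
      = (children.filter (fun c => pvGetB c "is_adopted")).length
      + (children.filter (fun c => !pvGetB c "is_adopted")).length :=
    List.length_eq_length_filter_add (fun c => pvGetB c "is_adopted")
  have hsplit' : (children.length : Int)
      = ((children.filter (fun c => pvGetB c "is_adopted")).length : Int)
      + ((children.filter (fun c => !pvGetB c "is_adopted")).length : Int) := by
    exact_mod_cast hsplit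
  omega
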